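-- pv_equiv track=rewrite | github.com/MrBrantCode/unitest_baseline | mut_generate/mist_train_cf/cf_45104/solution.py | sum_excluding_self
-- ===== SOURCE A (Python) =====
-- def sum_excluding_self(lst):
--     if not lst:
--         return "Error: List is empty."
--
--     for i in lst:
--         if not isinstance(i, int):
--             return f"Error: List contains non-integer value {i}."
--
--     result = []
--     total_sum = sum(lst)
--
--     for num in lst:
--         result.append(total_sum - num)
--
--     return result
-- ===== SOURCE B (Python) =====
-- def sum_excluding_self(lst):
--     if not lst:
--         return "Error: List is empty."
--
--     for i in lst:
--         if not isinstance(i, int):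
--             return f"Error: List contains non-integer value {i}."
--
--     return [sum(lst[:i] + lst[i+1:]) for i in range(len(lst))]
-- ===== Notes on version B (the rewrite author's own statement) =====
-- stated objective: alternative
-- what changed: Replaces the compute-one-total-then-subtract loop by a per-index re-summation of the complement slices lst[:i]+lst[i+1:], a nested O(n^2) strategy instead of the O(n) single-total pass.
-- outside the precondition, e.g. on sum_excluding_self([]): A returns 'Error: List is empty.', B returns 'Error: List is empty.'
import Mathlib
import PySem

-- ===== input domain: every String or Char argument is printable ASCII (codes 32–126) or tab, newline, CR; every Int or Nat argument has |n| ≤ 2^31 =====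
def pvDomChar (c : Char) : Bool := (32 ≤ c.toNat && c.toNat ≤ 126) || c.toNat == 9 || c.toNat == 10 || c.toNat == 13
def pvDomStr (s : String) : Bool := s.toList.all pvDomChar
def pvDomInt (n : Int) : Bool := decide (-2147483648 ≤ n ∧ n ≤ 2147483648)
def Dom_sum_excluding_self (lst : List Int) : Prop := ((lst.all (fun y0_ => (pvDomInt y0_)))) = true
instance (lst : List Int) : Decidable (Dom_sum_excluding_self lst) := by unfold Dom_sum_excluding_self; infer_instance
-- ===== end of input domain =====

-- B re-sums the complement slices lst[:i]+lst[i+1:] per index instead of subtracting each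
-- element from one precomputed total (alternative decomposition, not faster).

-- ===== PORT A =====
-- (the isinstance loop never fires over List Int and the empty-list string return is excluded by Pre_)
def sum_excluding_self (lst : List Int) : List Int :=
  let total_sum := lst.foldl (· + ·) 0
  lst.foldl (fun result num => result ++ [total_sum - num]) []

-- ===== PORT B =====
def sum_excluding_self_alt (lst : List Int) : List Int :=
  (PySem.List.pyRange 0 (lst.length : Int) 1).map
    (fun i => (PySem.List.slice lst none (some i) ++ PySem.List.slice lst (some (i + 1)) none).foldl (· + ·) 0)

-- ===== PRECONDITION & SPEC =====
-- Pre_ excludes the empty list, on which A returns the string "Error: List is empty." — not a value of the declared List Int type.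
def Pre_sum_excluding_self (lst : List Int) : Prop := lst ≠ []
instance (lst : List Int) : Decidable (Pre_sum_excluding_self lst) := by unfold Pre_sum_excluding_self; infer_instance
def pvWitness_sum_excluding_self : List Int := [1, 2, 3]
def Spec_sum_excluding_self (lst : List Int) (out : List Int) : Prop := out = sum_excluding_self_alt lst
instance (lst : List Int) (out : List Int) : Decidable (Spec_sum_excluding_self lst out) := by unfold Spec_sum_excluding_self; infer_instance

-- ===== CLAIM (what is proved, stated in full; the proofs are below) =====
def Claim_equal_sum_excluding_self : Prop := ∀ (lst : List Int), Dom_sum_excluding_self lst → Pre_sum_excluding_self lst → Spec_sum_excluding_self lst (sum_excluding_self lst)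

-- ===== LEMMAS AND PROOFS =====

theorem pv_foldl_add_eq_sum (l : List Int) (a : Int) : l.foldl (· + ·) a = a + l.sum := by
  induction l generalizing a with
  | nil => simp
  | cons x xs ih => simp [List.foldl, ih (a + x)]; ring

theorem pv_complement_sum (l : List Int) (k : Nat) (hk : k < l.length) :
    (l.take k).sum + (l.drop (k + 1)).sum = l.sum - l[k] := by
  induction l generalizing k with
  | nil => simp at hk
  | cons x xs ih =>
    cases k with
    | zero => simp
    | succ m =>
      simp only [List.take_succ_cons, List.drop_succ_cons, List.sum_cons, List.getElem_cons_succ]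
      have := ih m (by simpa using hk)
      omega

theorem sum_excluding_self_eq_map (lst : List Int) :
    sum_excluding_self lst = lst.map (fun num => lst.sum - num) := by
  unfold sum_excluding_self
  rw [PySem.List.foldl_append_singleton_eq_map, pv_foldl_add_eq_sum]
  simp

theorem sum_excluding_self_alt_eq_map (lst : List Int) :
    sum_excluding_self_alt lst =
      (List.range lst.length).map (fun k => (lst.take k).sum + (lst.drop (k + 1)).sum) := by
  unfold sum_excluding_self_alt
  rw [PySem.List.pyRange_one]
  simp only [Int.sub_zero, Int.toNat_natCast, List.map_map]
  refine List.map_congr_left (fun k hk => ?_)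
  simp only [Function.comp_apply, Int.zero_add]
  rw [PySem.List.slice_to_natCast]
  have : ((k : Int) + 1) = ((k + 1 : Nat) : Int) := by push_cast; ring
  rw [this, PySem.List.slice_from_natCast]
  rw [pv_foldl_add_eq_sum]
  simp

-- ===== VERDICT (by name: the statement is the Claim_ definition above) =====
theorem sum_excluding_self_spec : Claim_equal_sum_excluding_self := by
  intro lst _ _
  unfold Spec_sum_excluding_self
  rw [sum_excluding_self_eq_map, sum_excluding_self_alt_eq_map]
  apply List.ext_getElem
  · simp
  · intro k h1 h2
    have hk : k < lst.length := by simpa using h1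
    simp only [List.getElem_map, List.getElem_range]
    rw [pv_complement_sum lst k hk]
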